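-- pv_equiv track=rewrite | github.com/Tinkerforge/esp32-firmware | software/src/modules/heating/tests/test_heating_plan.py | make_sawtooth
-- ===== SOURCE A (Python) =====
-- def make_sawtooth(count: int, period: int = 8, low: int = 1000,
--                   high: int = 9000) -> list:
--     """Sawtooth wave: ramp up then drop."""
--     prices = []
--     for i in range(count):
--         phase = i % period
--         price = low + (high - low) * phase // (period - 1) if period > 1 else low
--         prices.append(price)
--     return prices
-- ===== SOURCE B (Python) =====
-- def make_sawtooth(count: int, period: int = 8, low: int = 1000,
--                   high: int = 9000) -> list:
--     """Sawtooth wave: precompute one period's value table, then index into it."""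
--     count = max(count, 0)
--     if period > 1:
--         base = [low + (high - low) * p // (period - 1)
--                 for p in range(min(period, count))]
--         return [base[i % period] for i in range(count)]
--     return [low] * count
-- ===== Notes on version B (the rewrite author's own statement) =====
-- stated objective: alternative
-- what changed: B precomputes the value table for one period once and builds the output by pure modular table lookup (plus a replicate shortcut when period <= 1), instead of recomputing the ramp arithmetic for every element as A does.
import Mathlib
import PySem

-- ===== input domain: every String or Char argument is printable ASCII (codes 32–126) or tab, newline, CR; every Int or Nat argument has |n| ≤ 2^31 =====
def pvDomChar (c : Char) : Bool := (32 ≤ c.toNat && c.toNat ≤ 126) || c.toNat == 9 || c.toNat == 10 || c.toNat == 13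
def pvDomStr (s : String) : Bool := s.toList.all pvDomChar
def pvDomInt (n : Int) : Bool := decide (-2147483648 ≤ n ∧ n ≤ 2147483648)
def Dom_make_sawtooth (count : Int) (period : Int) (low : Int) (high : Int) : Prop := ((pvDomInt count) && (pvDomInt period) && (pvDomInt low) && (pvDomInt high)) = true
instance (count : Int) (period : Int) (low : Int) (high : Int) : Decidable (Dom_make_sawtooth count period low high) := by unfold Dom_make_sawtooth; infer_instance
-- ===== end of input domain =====

-- B builds one period's value table once and fills the output by modular lookup,
-- instead of recomputing the ramp arithmetic for every element (objective: alternative decomposition).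

-- ===== PORT A =====
-- per-element recomputation: for i in range(count): phase = i % period; price = … ; prices.append(price)
def make_sawtooth (count : Int) (period : Int) (low : Int) (high : Int) : List Int :=
  (PySem.List.pyRange 0 count 1).foldl (fun prices i =>
    let phase := PySem.Int.mod i period
    let price := if period > 1 then low + PySem.Int.floordiv ((high - low) * phase) (period - 1) else low
    prices ++ [price]) []

-- ===== PORT B =====
-- two-phase: precompute base table for one period, then index base[i % period]
-- (pyGetD's default 0 is a totalization guard only: the index i % period is always in range)
def make_sawtooth_alt (count : Int) (period : Int) (low : Int) (high : Int) : List Int :=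
  let count' := max count 0
  if period > 1 then
    let base := (PySem.List.pyRange 0 (min period count') 1).map
      (fun p => low + PySem.Int.floordiv ((high - low) * p) (period - 1))
    (PySem.List.pyRange 0 count' 1).map (fun i => PySem.List.pyGetD base (PySem.Int.mod i period) 0)
  else
    List.replicate count'.toNat low

-- ===== PRECONDITION & SPEC =====
-- Pre_ excludes exactly the inputs where A raises ZeroDivisionError: period == 0 with count > 0 (i % 0).
def Pre_make_sawtooth (count : Int) (period : Int) (low : Int) (high : Int) : Prop :=
  period ≠ 0 ∨ count ≤ 0
instance (count : Int) (period : Int) (low : Int) (high : Int) : Decidable (Pre_make_sawtooth count period low high) := by unfold Pre_make_sawtooth; infer_instance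
def pvWitness_make_sawtooth : Int × Int × Int × Int := (5, 8, 1000, 9000)

def Spec_make_sawtooth (count : Int) (period : Int) (low : Int) (high : Int) (out : List Int) : Prop := out = make_sawtooth_alt count period low high
instance (count : Int) (period : Int) (low : Int) (high : Int) (out : List Int) : Decidable (Spec_make_sawtooth count period low high out) := by unfold Spec_make_sawtooth; infer_instance

-- ===== CLAIM (what is proved, stated in full; the proofs are below) =====
def Claim_equal_make_sawtooth : Prop := ∀ (count : Int) (period : Int) (low : Int) (high : Int), Dom_make_sawtooth count period low high → Pre_make_sawtooth count period low high → Spec_make_sawtooth count period low high (make_sawtooth count period low high)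

-- ===== LEMMAS AND PROOFS =====

-- ===== VERDICT (by name: the statement is the Claim_ definition above) =====
theorem make_sawtooth_spec : Claim_equal_make_sawtooth := by
  intro count period low high _ hpre
  unfold Spec_make_sawtooth make_sawtooth make_sawtooth_alt
  simp only [PySem.List.foldl_append_singleton_eq_map, List.nil_append]
  have hrange : PySem.List.pyRange 0 count 1 = PySem.List.pyRange 0 (max count 0) 1 := by
    by_cases h : count ≤ 0
    · rw [PySem.List.pyRange_one_eq_nil h, PySem.List.pyRange_one_eq_nil (by omega)]
    · rw [max_eq_left (by omega : (0:Int) ≤ count)]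
  by_cases hp : period > 1
  · simp only [if_pos hp, hrange]
    refine List.map_congr_left (fun i hi => ?_)
    have hi' := (PySem.List.mem_pyRange_one).1 hi
    have hpos : 0 < period := by omega
    have hmp := PySem.Int.mod_lt i hpos
    have hmlt : PySem.Int.mod i period < min period (max count 0) := by
      by_cases h : period ≤ max count 0
      · omega
      · have : PySem.Int.mod i period = i := by
          rw [PySem.Int.mod_eq_emod_of_pos hpos, Int.emod_eq_of_lt hi'.1 (by omega)]
        omega
    rw [PySem.List.pyGetD_map_pyRange_of_nonneg _ _ _ _
          (PySem.Int.mod_nonneg i hpos) hmlt]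
  · simp only [if_neg hp, hrange]
    rw [List.map_const']
    rw [PySem.List.length_pyRange_one]
    norm_num
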